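-- pv_equiv track=rewrite | github.com/SuBhAm6G/Data-Science-Learning | String Specialisation/3_Iterative Traversal and Membership Evaluation/practice.py | func
-- ===== SOURCE A (Python) =====
-- def func(s):
--     start=-1
--     end=-1
--     for i,ch in enumerate(s):
--         if ch.isdigit():
--             start=i+1
--             break
--     for j in range(len(s)-1, -1, -1):
--         if s[j].isdigit():
--             end=j
--             break
--     if start==-1 or end==-1:
--         return ""
--     return s[start:end][::-1]
-- ===== SOURCE B (Python) =====
-- def func(s):
--     idx = [i for i, ch in enumerate(s) if ch.isdigit()]
--     if not idx:
--         return ""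
--     return s[idx[0] + 1:idx[-1]][::-1]
-- ===== Notes on version B (the rewrite author's own statement) =====
-- stated objective: simpler
-- what changed: Replaces A's two separate scans (forward enumerate loop with break, backward range loop with break) and sentinel -1 bookkeeping by one index table of all digit positions with O(1) first/last lookups.
import Mathlib
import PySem

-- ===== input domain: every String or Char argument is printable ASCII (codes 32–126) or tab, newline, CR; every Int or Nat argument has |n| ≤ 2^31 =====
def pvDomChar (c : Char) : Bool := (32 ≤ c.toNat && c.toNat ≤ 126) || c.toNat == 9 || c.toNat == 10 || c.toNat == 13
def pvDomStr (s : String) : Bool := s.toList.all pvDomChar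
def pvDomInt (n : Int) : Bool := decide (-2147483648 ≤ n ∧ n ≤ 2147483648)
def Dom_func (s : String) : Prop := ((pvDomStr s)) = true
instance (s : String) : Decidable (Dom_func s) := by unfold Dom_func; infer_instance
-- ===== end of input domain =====

-- B replaces A's two break-loops and -1 sentinels by one table of digit indices with first/last lookups (simpler).

-- ===== PORT A =====
-- first loop: for i,ch in enumerate(s): if ch.isdigit(): start=i+1; break   (start stays -1 otherwise)
def funcStartLoop : List (Int × Char) → Int
  | [] => -1
  | (i, ch) :: rest => if PySem.Chars.isdigit ch then i + 1 else funcStartLoop rest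

-- second loop: for j in range(len(s)-1,-1,-1): if s[j].isdigit(): end=j; break
-- (s[j] is always in range for j drawn from this range, so the pyGetD default is never used)
def funcEndLoop (cs : List Char) : List Int → Int
  | [] => -1
  | j :: rest => if PySem.Chars.isdigit (PySem.List.pyGetD cs j ' ') then j else funcEndLoop cs rest

def func (s : String) : String :=
  let cs := s.toList
  let start := funcStartLoop (PySem.List.enumerate cs 0)
  let e := funcEndLoop cs (PySem.List.pyRange ((cs.length : Int) - 1) (-1) (-1))
  if start = -1 ∨ e = -1 then ""
  else String.ofList ((PySem.List.slice cs (some start) (some e)).reverse)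

-- ===== PORT B =====
def func_alt (s : String) : String :=
  let cs := s.toList
  let idx := ((PySem.List.enumerate cs 0).filter (fun p => PySem.Chars.isdigit p.2)).map (·.1)
  match idx with
  | [] => ""
  | i :: rest =>
      String.ofList ((PySem.List.slice cs (some (i + 1))
        (some ((i :: rest).getLast (List.cons_ne_nil _ _)))).reverse)

-- ===== PRECONDITION & SPEC =====
def Spec_func (s : String) (out : String) : Prop := out = func_alt s
instance (s : String) (out : String) : Decidable (Spec_func s out) := by unfold Spec_func; infer_instance

-- ===== CLAIM (what is proved, stated in full; the proofs are below) =====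
def Claim_equal_func : Prop := ∀ (s : String), Dom_func s → Spec_func s (func s)

-- ===== LEMMAS AND PROOFS =====

-- the start loop over a (j, g j) table is a filtered head
theorem funcStartLoop_map (g : Int → Char) (js : List Int) :
    funcStartLoop (js.map (fun j => (j, g j))) =
      match js.filter (fun j => PySem.Chars.isdigit (g j)) with
      | [] => -1
      | j :: _ => j + 1 := by
  induction js with
  | nil => rfl
  | cons j rest ih =>
      simp only [List.map_cons, funcStartLoop, List.filter_cons]
      by_cases h : PySem.Chars.isdigit (g j) <;> simp [h, ih]

-- the end loop is find?-with-default
theorem funcEndLoop_eq_find? (cs : List Char) (js : List Int) :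
    funcEndLoop cs js =
      ((js.find? (fun j => PySem.Chars.isdigit (PySem.List.pyGetD cs j ' '))).getD (-1)) := by
  induction js with
  | nil => rfl
  | cons j rest ih =>
      simp only [funcEndLoop, List.find?_cons]
      by_cases h : PySem.Chars.isdigit (PySem.List.pyGetD cs j ' ') <;> simp [h, ih]

-- first match of the reversed list is the last match
theorem find?_reverse_eq_getLast?_filter {α : Type} (q : α → Bool) (l : List α) :
    l.reverse.find? q = (l.filter q).getLast? := by
  induction l with
  | nil => rfl
  | cons x rest ih =>
      rw [List.reverse_cons, List.find?_append, ih, List.filter_cons]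
      by_cases h : q x
      · cases hrl : (rest.filter q).getLast? <;> simp [List.getLast?_cons, hrl, h]
      · simp [h]

theorem func_eq (s : String) : func s = func_alt s := by
  unfold func func_alt
  have hEnum := PySem.List.enumerate_eq_map_pyRange ' ' (xs := s.toList)
  set cs := s.toList with hcs
  set q : Int → Bool := fun j => PySem.Chars.isdigit (PySem.List.pyGetD cs j ' ') with hq
  have hrange : PySem.List.pyRange ((cs.length : Int) - 1) (-1) (-1)
      = (PySem.List.pyRange 0 (cs.length : Int) 1).reverse := by
    rw [PySem.List.pyRange_neg_one_eq_reverse]; norm_num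
  have hidx : ((PySem.List.enumerate cs 0).filter (fun p => PySem.Chars.isdigit p.2)).map (·.1)
      = (PySem.List.pyRange 0 (cs.length : Int) 1).filter q := by
    rw [hEnum, List.filter_map, List.map_map]
    simp [Function.comp_def, hq]
  have hstart : funcStartLoop (PySem.List.enumerate cs 0) =
      match (PySem.List.pyRange 0 (cs.length : Int) 1).filter q with
      | [] => -1
      | j :: _ => j + 1 := by
    rw [hEnum, funcStartLoop_map]
    rfl
  have hend : funcEndLoop cs (PySem.List.pyRange ((cs.length : Int) - 1) (-1) (-1)) =
      (((PySem.List.pyRange 0 (cs.length : Int) 1).filter q).getLast?).getD (-1) := by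
    rw [hrange, funcEndLoop_eq_find?, find?_reverse_eq_getLast?_filter]
  have hnonneg : ∀ j ∈ (PySem.List.pyRange 0 (cs.length : Int) 1).filter q, 0 ≤ j := by
    intro j hj
    have := List.mem_of_mem_filter hj
    have := (PySem.List.mem_pyRange_one (x := j)).mp this
    omega
  simp only [hidx, hstart, hend]
  cases hfil : (PySem.List.pyRange 0 (cs.length : Int) 1).filter q with
  | nil => simp
  | cons i rest =>
      have hi : 0 ≤ i := hnonneg i (by simp [hfil])
      have hlast := List.getLast?_eq_some_getLast (l := i :: rest) (List.cons_ne_nil _ _)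
      have hle : 0 ≤ (i :: rest).getLast (List.cons_ne_nil _ _) := by
        apply hnonneg
        rw [hfil]
        exact List.getLast_mem _
      rw [hlast]
      simp only [Option.getD_some]
      have hcond : ¬ (i + 1 = -1 ∨ (i :: rest).getLast (List.cons_ne_nil _ _) = -1) := by
        push_neg
        omega
      rw [if_neg hcond]

-- ===== VERDICT (by name: the statement is the Claim_ definition above) =====
theorem func_spec : Claim_equal_func := by
  intro s _
  exact func_eq s
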